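-- pv_equiv track=rewrite | github.com/EthanSuperior/CS-312 | Projects/Project 4/GeneSequencing.py | _alignment_strings
-- ===== SOURCE A (Python) =====
-- DELETE = 1
--
-- INSERT = 2
--
-- def _alignment_strings(seq1, seq2, path):
-- 	"""
-- 	Function to produce the edited versions of the sequences.
-- 	Complexity:
-- 		Time: O(1) - 100 iterations, reduces O(100) to O(1)
-- 		Space: O(1) - 200 characters, reduces O(200) to O(1)
-- 	:param seq1: first sequence to edit
-- 	:param seq2: second sequence to edit
-- 	:param path: deque of edits to make
-- 	:return: first 100 characters of the edited versions of seq1 and seq2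
-- 	"""
-- 	str1 = str2 = ""
-- 	seq1Idx = seq2Idx = 0
-- 	''' Iterate through last 100 values of the path, the first 100 of the sequences
-- 		Time: O(1) Space: O(1) '''
-- 	for move in path[:-101:-1]:
-- 		''' Appends a character or '-' to each string according to the respective edit made '''
-- 		if move == INSERT:
-- 			str1 += seq1[seq1Idx]
-- 			seq1Idx += 1
-- 			str2 += '-'
-- 		elif move == DELETE:
-- 			str1 += '-'
-- 			str2 += seq2[seq2Idx]
-- 			seq2Idx += 1
-- 		else:
-- 			str1 += seq1[seq1Idx]
-- 			str2 += seq2[seq2Idx]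
-- 			seq1Idx += 1
-- 			seq2Idx += 1
-- 	''' resulting 100 character strings '''
-- 	return str1, str2
-- ===== SOURCE B (Python) =====
-- DELETE = 1
--
-- INSERT = 2
--
-- def _alignment_strings(seq1, seq2, path):
-- 	def build(seq, gap_move):
-- 		out = []
-- 		idx = 0
-- 		for move in path[:-101:-1]:
-- 			if move == gap_move:
-- 				out.append('-')
-- 			else:
-- 				out.append(seq[idx])
-- 				idx += 1
-- 		return ''.join(out)
-- 	return build(seq1, DELETE), build(seq2, INSERT)
-- ===== Notes on version B (the rewrite author's own statement) =====
-- stated objective: simpler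
-- what changed: Replaces the single interleaved loop with four pieces of state by one parameterized helper build(seq, gap_move) run twice, since each output string depends only on the path and its own sequence; characters are collected in a list and joined once instead of repeated string concatenation.
import Mathlib
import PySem

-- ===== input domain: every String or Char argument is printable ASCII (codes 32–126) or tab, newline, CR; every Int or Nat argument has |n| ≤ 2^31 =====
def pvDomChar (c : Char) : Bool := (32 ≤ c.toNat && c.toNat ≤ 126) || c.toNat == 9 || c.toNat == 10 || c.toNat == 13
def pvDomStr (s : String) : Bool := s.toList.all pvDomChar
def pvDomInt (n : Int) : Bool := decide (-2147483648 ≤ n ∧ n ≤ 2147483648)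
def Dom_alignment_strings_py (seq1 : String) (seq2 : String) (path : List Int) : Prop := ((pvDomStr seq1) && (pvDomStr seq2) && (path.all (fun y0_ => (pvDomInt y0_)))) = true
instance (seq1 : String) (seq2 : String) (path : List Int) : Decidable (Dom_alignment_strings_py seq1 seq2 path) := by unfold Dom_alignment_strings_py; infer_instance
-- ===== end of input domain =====

-- ===== PORT A =====
-- B splits A's interleaved loop into one parameterized helper run twice (same traversal, independent state per output string); not faster, simpler.
-- A's loop over path[:-101:-1], carrying (str1, str2, seq1Idx, seq2Idx); character fetch is
-- seqL.getD i ' ' — exact wherever Python does not raise IndexError (Pre_ excludes the raising inputs).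
def pvGoA (l1 l2 : List Char) : List Int → List Char → List Char → Nat → Nat → List Char × List Char
  | [], s1, s2, _, _ => (s1, s2)
  | m :: rest, s1, s2, i1, i2 =>
    if m = 2 then pvGoA l1 l2 rest (s1 ++ [l1.getD i1 ' ']) (s2 ++ ['-']) (i1 + 1) i2
    else if m = 1 then pvGoA l1 l2 rest (s1 ++ ['-']) (s2 ++ [l2.getD i2 ' ']) i1 (i2 + 1)
    else pvGoA l1 l2 rest (s1 ++ [l1.getD i1 ' ']) (s2 ++ [l2.getD i2 ' ']) (i1 + 1) (i2 + 1)

def alignment_strings_py (seq1 : String) (seq2 : String) (path : List Int) : String × String :=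
  let rev := (PySem.List.slice? path none (some (-101)) (-1)).getD []   -- path[:-101:-1]; step ≠ 0, never none
  let r := pvGoA seq1.toList seq2.toList rev [] [] 0 0
  (String.ofList r.1, String.ofList r.2)

-- ===== PORT B =====
-- B's inner helper build(seq, gap_move): one pass over the same slice, list accumulator joined at the end.
def pvBuild (l : List Char) (gap : Int) : List Int → List Char → Nat → List Char
  | [], acc, _ => acc
  | m :: rest, acc, i =>
    if m = gap then pvBuild l gap rest (acc ++ ['-']) i
    else pvBuild l gap rest (acc ++ [l.getD i ' ']) (i + 1)

def alignment_strings_py_alt (seq1 : String) (seq2 : String) (path : List Int) : String × String :=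
  let rev := (PySem.List.slice? path none (some (-101)) (-1)).getD []   -- path[:-101:-1]
  (String.ofList (pvBuild seq1.toList 1 rev [] 0), String.ofList (pvBuild seq2.toList 2 rev [] 0))

-- ===== PRECONDITION & SPEC =====
-- Pre_ excludes exactly the inputs where Python raises IndexError (both A and B do): the iterated
-- slice needs one character of seq1 for every move ≠ DELETE and one of seq2 for every move ≠ INSERT.
def Pre_alignment_strings_py (seq1 : String) (seq2 : String) (path : List Int) : Prop :=
  let rev := (PySem.List.slice? path none (some (-101)) (-1)).getD []
  rev.countP (fun m => m != 1) ≤ seq1.toList.length ∧ rev.countP (fun m => m != 2) ≤ seq2.toList.length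
instance (seq1 : String) (seq2 : String) (path : List Int) : Decidable (Pre_alignment_strings_py seq1 seq2 path) := by unfold Pre_alignment_strings_py; infer_instance

def pvWitness_alignment_strings_py : String × String × List Int := ("abc", "abc", [0, 1, 2])

def Spec_alignment_strings_py (seq1 : String) (seq2 : String) (path : List Int) (out : String × String) : Prop := out = alignment_strings_py_alt seq1 seq2 path
instance (seq1 : String) (seq2 : String) (path : List Int) (out : String × String) : Decidable (Spec_alignment_strings_py seq1 seq2 path out) := by unfold Spec_alignment_strings_py; infer_instance

-- ===== CLAIM (what is proved, stated in full; the proofs are below) =====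
def Claim_equal_alignment_strings_py : Prop := ∀ (seq1 : String) (seq2 : String) (path : List Int), Dom_alignment_strings_py seq1 seq2 path → Pre_alignment_strings_py seq1 seq2 path → Spec_alignment_strings_py seq1 seq2 path (alignment_strings_py seq1 seq2 path)

-- ===== LEMMAS AND PROOFS =====
-- The interleaved loop is the pair of the two independent passes (for any moves and start state).
theorem pvGoA_eq_build (l1 l2 : List Char) :
    ∀ (rev : List Int) (s1 s2 : List Char) (i1 i2 : Nat),
      pvGoA l1 l2 rev s1 s2 i1 i2 = (pvBuild l1 1 rev s1 i1, pvBuild l2 2 rev s2 i2) := by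
  intro rev
  induction rev with
  | nil => intro s1 s2 i1 i2; rfl
  | cons m rest ih =>
    intro s1 s2 i1 i2
    by_cases h2 : m = 2
    · subst h2; simp [pvGoA, pvBuild, ih]
    · by_cases h1 : m = 1
      · subst h1; simp [pvGoA, pvBuild, ih]
      · simp [pvGoA, pvBuild, h1, h2, ih]

-- ===== VERDICT (by name: the statement is the Claim_ definition above) =====
theorem alignment_strings_py_spec : Claim_equal_alignment_strings_py := by
  intro seq1 seq2 path _ _
  unfold Spec_alignment_strings_py alignment_strings_py alignment_strings_py_alt
  simp [pvGoA_eq_build]
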